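-- pv_equiv track=rewrite | github.com/jjsalinas/Cripto | cifrado_flujo.py | descifrado_geffe
-- ===== SOURCE A (Python) =====
-- def LFSR(coef, semilla, lenSalida):
--     l_coef=len(coef)
--     l_semilla=len(semilla)
--     if l_coef==1:
--         return 1
--
--     s=semilla[:]
--     res=semilla[:]
--     while(len(res)<lenSalida):
--         sj=0
--         for i in range(l_semilla):
--             sj+=coef[i]*s[(len(res)-1)-i]
--         sj=sj%2
--         res.append(sj)
--         s.append(sj)
--     return res
--
-- def geffe(L1, L2, L3):
--     res=[]
--     for i in range(len(L1)):
--         aux=L1[i]*L2[i]+L2[i]*L3[i]+L3[i]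
--         aux=aux%2
--         res.append(aux)
--     return res
--
-- def descifrado_geffe(c):
--     lonc=len(c)
--     L1=LFSR([0,0,1,1], [1,0,0,0], lonc)
--     L2=LFSR([1,0,1,1], [1,1,0,1], lonc)
--     L3=LFSR([0,1,0,1], [0,1,0,1], lonc)
--     k=geffe(L1, L2, L3)
--     res=[]
--     for i in range(lonc):
--         e=c[i]+k[i]
--         e=e%2
--         res.append(e)
--     return res
-- ===== SOURCE B (Python) =====
-- def descifrado_geffe(c):
--     # One streaming pass: three 4-bit shift registers; each step emits the
--     # oldest bit of each register, combines them, and shifts in the feedback bit.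
--     r1 = (1, 0, 0, 0)
--     r2 = (1, 1, 0, 1)
--     r3 = (0, 1, 0, 1)
--     out = []
--     for ci in c:
--         k = (r1[0] * r2[0] + r2[0] * r3[0] + r3[0]) % 2
--         out.append((ci + k) % 2)
--         r1 = (r1[1], r1[2], r1[3], (r1[1] + r1[0]) % 2)
--         r2 = (r2[1], r2[2], r2[3], (r2[3] + r2[1] + r2[0]) % 2)
--         r3 = (r3[1], r3[2], r3[3], (r3[2] + r3[0]) % 2)
--     return out
-- ===== Notes on version B (the rewrite author's own statement) =====
-- stated objective: faster
-- what changed: A builds three full LFSR keystream lists with a while-loop helper, combines them into a fourth list, then makes a final indexed pass; B is a single streaming pass over c that keeps only three 4-bit shift-register tuples and emits each plaintext bit as it goes, never materialising the keystream lists.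
import Mathlib
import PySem

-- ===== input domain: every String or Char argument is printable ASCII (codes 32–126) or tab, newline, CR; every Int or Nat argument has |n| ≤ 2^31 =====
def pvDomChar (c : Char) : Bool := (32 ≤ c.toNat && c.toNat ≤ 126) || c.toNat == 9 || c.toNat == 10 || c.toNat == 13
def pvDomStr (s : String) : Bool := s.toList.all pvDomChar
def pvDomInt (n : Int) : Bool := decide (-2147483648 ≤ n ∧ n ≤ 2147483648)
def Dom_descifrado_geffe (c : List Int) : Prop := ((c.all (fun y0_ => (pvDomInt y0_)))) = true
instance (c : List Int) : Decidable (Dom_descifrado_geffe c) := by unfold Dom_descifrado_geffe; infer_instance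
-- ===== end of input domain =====

-- B replaces A's four list-building passes (three full LFSR output lists, a geffe
-- combination list, then the xor pass) by a single streaming pass over c that keeps
-- only three 4-bit shift-register states (measured constant-factor speedup; O(1) state instead of four n-length lists).

-- ===== PORT A =====
-- while-loop of LFSR: appends sj to both s and res until res reaches lenSalida
def pvLFSRloop (coef : List Int) (lSemilla : Nat) (lenSalida : Nat) (s res : List Int) : List Int :=
  if res.length < lenSalida then
    let sj := PySem.Int.mod ((List.range lSemilla).foldl
      (fun (sj : Int) (i : Nat) => sj + (PySem.List.pyGet? coef (i : Int)).getD 0 *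
        (PySem.List.pyGet? s ((res.length : Int) - 1 - (i : Int))).getD 0) 0) 2
      -- indices are always in range for the calls made here, so .getD 0 is exact
    pvLFSRloop coef lSemilla lenSalida (s ++ [sj]) (res ++ [sj])
  else res
termination_by lenSalida - res.length
decreasing_by simp; omega

def pvLFSR (coef semilla : List Int) (lenSalida : Nat) : List Int :=
  -- Python's l_coef==1 branch returns the bare int 1 (not a list); it is unreachable
  -- for the fixed 4-tap polynomials descifrado_geffe uses; ported as [1].
  if coef.length == 1 then [1]
  else pvLFSRloop coef semilla.length lenSalida semilla semilla

def pvGeffe (L1 L2 L3 : List Int) : List Int :=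
  (List.range L1.length).foldl (fun (res : List Int) (i : Nat) =>
    res ++ [PySem.Int.mod
      ((PySem.List.pyGet? L1 (i : Int)).getD 0 * (PySem.List.pyGet? L2 (i : Int)).getD 0
       + (PySem.List.pyGet? L2 (i : Int)).getD 0 * (PySem.List.pyGet? L3 (i : Int)).getD 0
       + (PySem.List.pyGet? L3 (i : Int)).getD 0) 2]) []

def descifrado_geffe (c : List Int) : List Int :=
  let lonc := c.length
  let L1 := pvLFSR [0,0,1,1] [1,0,0,0] lonc
  let L2 := pvLFSR [1,0,1,1] [1,1,0,1] lonc
  let L3 := pvLFSR [0,1,0,1] [0,1,0,1] lonc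
  let k := pvGeffe L1 L2 L3
  (List.range lonc).foldl (fun (res : List Int) (i : Nat) =>
    res ++ [PySem.Int.mod
      ((PySem.List.pyGet? c (i : Int)).getD 0 + (PySem.List.pyGet? k (i : Int)).getD 0) 2]) []

-- ===== PORT B =====
-- one shift step of each 4-bit register (oldest bit first in the tuple)
def pvStep1 (r : Int × Int × Int × Int) : Int × Int × Int × Int :=
  (r.2.1, r.2.2.1, r.2.2.2, PySem.Int.mod (r.2.1 + r.1) 2)
def pvStep2 (r : Int × Int × Int × Int) : Int × Int × Int × Int :=
  (r.2.1, r.2.2.1, r.2.2.2, PySem.Int.mod (r.2.2.2 + r.2.1 + r.1) 2)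
def pvStep3 (r : Int × Int × Int × Int) : Int × Int × Int × Int :=
  (r.2.1, r.2.2.1, r.2.2.2, PySem.Int.mod (r.2.2.1 + r.1) 2)

def descifrado_geffe_alt (c : List Int) : List Int :=
  (c.foldl
    (fun (st : List Int × (Int × Int × Int × Int) × (Int × Int × Int × Int) × (Int × Int × Int × Int)) ci =>
      let k := PySem.Int.mod
        (st.2.1.1 * st.2.2.1.1 + st.2.2.1.1 * st.2.2.2.1 + st.2.2.2.1) 2
      (st.1 ++ [PySem.Int.mod (ci + k) 2], pvStep1 st.2.1, pvStep2 st.2.2.1, pvStep3 st.2.2.2))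
    ([], (1,0,0,0), (1,1,0,1), (0,1,0,1))).1

-- ===== PRECONDITION & SPEC =====
def Spec_descifrado_geffe (c : List Int) (out : List Int) : Prop := out = descifrado_geffe_alt c
instance (c : List Int) (out : List Int) : Decidable (Spec_descifrado_geffe c out) := by unfold Spec_descifrado_geffe; infer_instance

-- ===== CLAIM (what is proved, stated in full; the proofs are below) =====
def Claim_equal_descifrado_geffe : Prop := ∀ (c : List Int), Dom_descifrado_geffe c → Spec_descifrado_geffe c (descifrado_geffe c)

-- ===== LEMMAS AND PROOFS =====

-- the three register streams and the keystream they generate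
def pvReg1 : Nat → Int × Int × Int × Int
  | 0 => (1,0,0,0)
  | n+1 => pvStep1 (pvReg1 n)
def pvReg2 : Nat → Int × Int × Int × Int
  | 0 => (1,1,0,1)
  | n+1 => pvStep2 (pvReg2 n)
def pvReg3 : Nat → Int × Int × Int × Int
  | 0 => (0,1,0,1)
  | n+1 => pvStep3 (pvReg3 n)

def pvL1 (n : Nat) : Int := (pvReg1 n).1
def pvL2 (n : Nat) : Int := (pvReg2 n).1
def pvL3 (n : Nat) : Int := (pvReg3 n).1

def pvK (n : Nat) : Int :=
  PySem.Int.mod (pvL1 n * pvL2 n + pvL2 n * pvL3 n + pvL3 n) 2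

theorem pvL1_rec (j : Nat) : pvL1 (j+4) = PySem.Int.mod (pvL1 (j+1) + pvL1 j) 2 := rfl
theorem pvL2_rec (j : Nat) : pvL2 (j+4) = PySem.Int.mod (pvL2 (j+3) + pvL2 (j+1) + pvL2 j) 2 := rfl
theorem pvL3_rec (j : Nat) : pvL3 (j+4) = PySem.Int.mod (pvL3 (j+2) + pvL3 j) 2 := rfl

theorem pyGet_range_map (L : Nat → Int) {N i : Nat} (h : i < N) :
    (PySem.List.pyGet? ((List.range N).map L) (i : Int)).getD 0 = L i := by
  rw [PySem.List.pyGet?_natCast]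
  simp [h]

theorem pvLFSRloop_eq (coef : List Int) (L : Nat → Int) (lonc : Nat)
    (hrec : ∀ m, 4 ≤ m → PySem.Int.mod ((List.range 4).foldl
      (fun (sj : Int) (i : Nat) => sj + (PySem.List.pyGet? coef (i : Int)).getD 0 * L (m - 1 - i)) 0) 2 = L m) :
    ∀ d m, lonc ≤ m + d → 4 ≤ m →
    pvLFSRloop coef 4 lonc ((List.range m).map L) ((List.range m).map L)
      = (List.range (max lonc m)).map L := by
  intro d
  induction d with
  | zero =>
    intro m hle h4
    rw [pvLFSRloop]
    simp at hle
    simp [Nat.not_lt.mpr hle, Nat.max_eq_right hle]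
  | succ d ih =>
    intro m hle h4
    rw [pvLFSRloop]
    by_cases hm : m < lonc
    · simp only [List.length_map, List.length_range, hm, if_pos]
      have hidx : ∀ i ∈ List.range 4,
          (PySem.List.pyGet? ((List.range m).map L) ((m : Int) - 1 - (i : Int))).getD 0
            = L (m - 1 - i) := by
        intro i hi
        simp only [List.mem_range] at hi
        have hcast : (m : Int) - 1 - (i : Int) = ((m - 1 - i : Nat) : Int) := by omega
        rw [hcast, pyGet_range_map L (by omega)]
      have hbody : (List.range 4).foldl
          (fun (sj : Int) (i : Nat) => sj + (PySem.List.pyGet? coef (i : Int)).getD 0 *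
            (PySem.List.pyGet? ((List.range m).map L) ((m : Int) - 1 - (i : Int))).getD 0) 0
          = (List.range 4).foldl
          (fun (sj : Int) (i : Nat) => sj + (PySem.List.pyGet? coef (i : Int)).getD 0 * L (m - 1 - i)) 0 := by
        apply List.foldl_ext
        intro a b hb
        rw [hidx b hb]
      have hsj : PySem.Int.mod ((List.range 4).foldl
          (fun (sj : Int) (i : Nat) => sj + (PySem.List.pyGet? coef (i : Int)).getD 0 *
            (PySem.List.pyGet? ((List.range m).map L) ((m : Int) - 1 - (i : Int))).getD 0) 0) 2
          = L m := by
        rw [hbody, hrec m h4]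
      have happ : ((List.range m).map L) ++ [L m] = (List.range (m+1)).map L := by
        rw [List.range_succ, List.map_append]; rfl
      rw [hsj, happ]
      have hih := ih (m+1) (by omega) (by omega)
      have hmax : max lonc (m+1) = max lonc m := by omega
      rw [hih, hmax]
    · simp only [List.length_map, List.length_range, hm, if_neg, not_false_iff]
      have : lonc ≤ m := by omega
      simp [Nat.max_eq_right this]

theorem range4_foldl (g : Nat → Int) :
    (List.range 4).foldl (fun (sj : Int) (i : Nat) => sj + g i) 0 = g 0 + g 1 + g 2 + g 3 := by
  simp [show List.range 4 = [0,1,2,3] from rfl, List.foldl]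

theorem pvL1_seed : (List.range 4).map pvL1 = [1,0,0,0] := by decide
theorem pvL2_seed : (List.range 4).map pvL2 = [1,1,0,1] := by decide
theorem pvL3_seed : (List.range 4).map pvL3 = [0,1,0,1] := by decide

theorem L1_eq (lonc : Nat) :
    pvLFSR [0,0,1,1] [1,0,0,0] lonc = (List.range (max lonc 4)).map pvL1 := by
  rw [pvLFSR]
  have hrec : ∀ m, 4 ≤ m → PySem.Int.mod ((List.range 4).foldl
      (fun (sj : Int) (i : Nat) => sj + (PySem.List.pyGet? ([0,0,1,1] : List Int) (i : Int)).getD 0 * pvL1 (m - 1 - i)) 0) 2 = pvL1 m := by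
    intro m h4
    obtain ⟨j, rfl⟩ : ∃ j, m = j + 4 := ⟨m - 4, by omega⟩
    rw [range4_foldl, pvL1_rec]
    have e0 : j + 4 - 1 - 0 = j + 3 := by omega
    have e1 : j + 4 - 1 - 1 = j + 2 := by omega
    have e2 : j + 4 - 1 - 2 = j + 1 := by omega
    have e3 : j + 4 - 1 - 3 = j := by omega
    rw [e0, e1, e2, e3]
    simp [PySem.List.pyGet?, PySem.List.pyIdx?]
  have h := pvLFSRloop_eq [0,0,1,1] pvL1 lonc hrec lonc 4 (by omega) (by omega)
  rw [pvL1_seed] at h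
  simpa using h
theorem L2_eq (lonc : Nat) :
    pvLFSR [1,0,1,1] [1,1,0,1] lonc = (List.range (max lonc 4)).map pvL2 := by
  rw [pvLFSR]
  have hrec : ∀ m, 4 ≤ m → PySem.Int.mod ((List.range 4).foldl
      (fun (sj : Int) (i : Nat) => sj + (PySem.List.pyGet? ([1,0,1,1] : List Int) (i : Int)).getD 0 * pvL2 (m - 1 - i)) 0) 2 = pvL2 m := by
    intro m h4
    obtain ⟨j, rfl⟩ : ∃ j, m = j + 4 := ⟨m - 4, by omega⟩
    rw [range4_foldl, pvL2_rec]
    have e0 : j + 4 - 1 - 0 = j + 3 := by omega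
    have e1 : j + 4 - 1 - 1 = j + 2 := by omega
    have e2 : j + 4 - 1 - 2 = j + 1 := by omega
    have e3 : j + 4 - 1 - 3 = j := by omega
    rw [e0, e1, e2, e3]
    simp [PySem.List.pyGet?, PySem.List.pyIdx?]
  have h := pvLFSRloop_eq [1,0,1,1] pvL2 lonc hrec lonc 4 (by omega) (by omega)
  rw [pvL2_seed] at h
  simpa using h
theorem L3_eq (lonc : Nat) :
    pvLFSR [0,1,0,1] [0,1,0,1] lonc = (List.range (max lonc 4)).map pvL3 := by
  rw [pvLFSR]
  have hrec : ∀ m, 4 ≤ m → PySem.Int.mod ((List.range 4).foldl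
      (fun (sj : Int) (i : Nat) => sj + (PySem.List.pyGet? ([0,1,0,1] : List Int) (i : Int)).getD 0 * pvL3 (m - 1 - i)) 0) 2 = pvL3 m := by
    intro m h4
    obtain ⟨j, rfl⟩ : ∃ j, m = j + 4 := ⟨m - 4, by omega⟩
    rw [range4_foldl, pvL3_rec]
    have e0 : j + 4 - 1 - 0 = j + 3 := by omega
    have e1 : j + 4 - 1 - 1 = j + 2 := by omega
    have e2 : j + 4 - 1 - 2 = j + 1 := by omega
    have e3 : j + 4 - 1 - 3 = j := by omega
    rw [e0, e1, e2, e3]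
    simp [PySem.List.pyGet?, PySem.List.pyIdx?]
  have h := pvLFSRloop_eq [0,1,0,1] pvL3 lonc hrec lonc 4 (by omega) (by omega)
  rw [pvL3_seed] at h
  simpa using h
theorem foldl_append_map {α : Type} (g : α → Int) :
    ∀ (l : List α) (init : List Int),
    l.foldl (fun res i => res ++ [g i]) init = init ++ l.map g := by
  intro l
  induction l with
  | nil => simp
  | cons x xs ih => intro init; simp [List.foldl, ih]

theorem geffe_eq (N : Nat) :
    pvGeffe ((List.range N).map pvL1) ((List.range N).map pvL2) ((List.range N).map pvL3)
      = (List.range N).map pvK := by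
  rw [pvGeffe]
  simp only [List.length_map, List.length_range]
  rw [foldl_append_map]
  simp only [List.nil_append]
  apply List.map_congr_left
  intro i hi
  simp only [List.mem_range] at hi
  rw [pyGet_range_map pvL1 hi, pyGet_range_map pvL2 hi, pyGet_range_map pvL3 hi]
  rfl

-- A's output characterized elementwise
theorem A_eq (c : List Int) :
    descifrado_geffe c
      = (List.range c.length).map (fun (i : Nat) => PySem.Int.mod ((PySem.List.pyGet? c (i : Int)).getD 0 + pvK i) 2) := by
  rw [descifrado_geffe]
  simp only [L1_eq, L2_eq, L3_eq, geffe_eq]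
  rw [foldl_append_map]
  simp only [List.nil_append]
  apply List.map_congr_left
  intro i hi
  simp only [List.mem_range] at hi
  rw [pyGet_range_map pvK (by omega : i < max c.length 4)]

-- B's loop invariant: starting from the registers at time n, the loop appends the
-- elementwise result with keystream offset n
theorem B_inv :
    ∀ (c : List Int) (out : List Int) (n : Nat),
    (c.foldl
      (fun (st : List Int × (Int × Int × Int × Int) × (Int × Int × Int × Int) × (Int × Int × Int × Int)) ci =>
        let k := PySem.Int.mod
          (st.2.1.1 * st.2.2.1.1 + st.2.2.1.1 * st.2.2.2.1 + st.2.2.2.1) 2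
        (st.1 ++ [PySem.Int.mod (ci + k) 2], pvStep1 st.2.1, pvStep2 st.2.2.1, pvStep3 st.2.2.2))
      (out, pvReg1 n, pvReg2 n, pvReg3 n)).1
      = out ++ (List.range c.length).map
          (fun (i : Nat) => PySem.Int.mod ((PySem.List.pyGet? c (i : Int)).getD 0 + pvK (n + i)) 2) := by
  intro c
  induction c with
  | nil => intro out n; simp
  | cons ci rest ih =>
    intro out n
    rw [List.foldl_cons]
    have key := ih (out ++ [PySem.Int.mod (ci + pvK n) 2]) (n + 1)
    have h0 : PySem.Int.mod (ci + pvK n) 2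
        = PySem.Int.mod ((PySem.List.pyGet? (ci :: rest) ((0 : Nat) : Int)).getD 0 + pvK (n + 0)) 2 := by
      rw [PySem.List.pyGet?_natCast]
      rfl
    have htail : (List.range rest.length).map
        (fun (i : Nat) => PySem.Int.mod ((PySem.List.pyGet? rest (i : Int)).getD 0 + pvK (n + 1 + i)) 2)
        = (List.range rest.length).map
          ((fun (i : Nat) => PySem.Int.mod ((PySem.List.pyGet? (ci :: rest) (i : Int)).getD 0 + pvK (n + i)) 2) ∘ Nat.succ) := by
      apply List.map_congr_left
      intro i hi
      simp only [Function.comp]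
      rw [PySem.List.pyGet?_natCast, PySem.List.pyGet?_natCast]
      have hn : n + 1 + i = n + Nat.succ i := by omega
      rw [hn, List.getElem?_cons_succ]
    have h2 : (out ++ [PySem.Int.mod (ci + pvK n) 2]) ++ (List.range rest.length).map
        (fun (i : Nat) => PySem.Int.mod ((PySem.List.pyGet? rest (i : Int)).getD 0 + pvK (n + 1 + i)) 2)
        = out ++ (List.range (ci :: rest).length).map
          (fun (i : Nat) => PySem.Int.mod ((PySem.List.pyGet? (ci :: rest) (i : Int)).getD 0 + pvK (n + i)) 2) := by
      rw [List.length_cons, List.range_succ_eq_map, List.map_cons, List.map_map, List.append_assoc, ← h0, htail]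
      rfl
    exact key.trans h2

-- ===== VERDICT (by name: the statement is the Claim_ definition above) =====
theorem descifrado_geffe_spec : Claim_equal_descifrado_geffe := by
  intro c _
  unfold Spec_descifrado_geffe
  rw [A_eq, descifrado_geffe_alt]
  rw [show ((1,0,0,0) : Int × Int × Int × Int) = pvReg1 0 from rfl,
      show ((1,1,0,1) : Int × Int × Int × Int) = pvReg2 0 from rfl,
      show ((0,1,0,1) : Int × Int × Int × Int) = pvReg3 0 from rfl]
  rw [B_inv c [] 0]
  simp
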